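-- pv_equiv track=rewrite | github.com/RyukiKuwahara/kyopuro | AHC/AHC30/main.py | calc_overlap_sum
-- ===== SOURCE A (Python) =====
-- def create_field(N, ele):
--     field = [[ele for _ in range(N)] for _ in range(N)]
--     return field
--
-- def calc_overlap_sum(fields, s, x, N):
--     s_field = create_field(N, False)
--     x_field = create_field(N, 0)
--
--     for i, j in s:
--         s_field[i][j] = True
--     for k, (si, sj) in enumerate(x):
--         for i, j in fields[k]:
--             x_field[si+i][sj+j] += 1
--     cnt = 0
--     for i in range(N):
--         for j in range(N):
--             if s_field[i][j] == True:
--                 cnt += x_field[i][j]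
--     return cnt
-- ===== SOURCE B (Python) =====
-- def calc_overlap_sum(fields, s, x, N):
--     x_field = [[0 for _ in range(N)] for _ in range(N)]
--     for k, (si, sj) in enumerate(x):
--         for i, j in fields[k]:
--             x_field[si + i][sj + j] += 1
--     cnt = 0
--     for i, j in s:
--         cnt += x_field[i][j]
--         x_field[i][j] = 0
--     return cnt
-- ===== Notes on version B (the rewrite author's own statement) =====
-- stated objective: simpler
-- what changed: B drops the boolean mask grid and the full N*N scan: it builds only the count grid and makes a single destructive pass over the target list s, adding each cell's count and zeroing it so repeated targets count once.
import Mathlib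
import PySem

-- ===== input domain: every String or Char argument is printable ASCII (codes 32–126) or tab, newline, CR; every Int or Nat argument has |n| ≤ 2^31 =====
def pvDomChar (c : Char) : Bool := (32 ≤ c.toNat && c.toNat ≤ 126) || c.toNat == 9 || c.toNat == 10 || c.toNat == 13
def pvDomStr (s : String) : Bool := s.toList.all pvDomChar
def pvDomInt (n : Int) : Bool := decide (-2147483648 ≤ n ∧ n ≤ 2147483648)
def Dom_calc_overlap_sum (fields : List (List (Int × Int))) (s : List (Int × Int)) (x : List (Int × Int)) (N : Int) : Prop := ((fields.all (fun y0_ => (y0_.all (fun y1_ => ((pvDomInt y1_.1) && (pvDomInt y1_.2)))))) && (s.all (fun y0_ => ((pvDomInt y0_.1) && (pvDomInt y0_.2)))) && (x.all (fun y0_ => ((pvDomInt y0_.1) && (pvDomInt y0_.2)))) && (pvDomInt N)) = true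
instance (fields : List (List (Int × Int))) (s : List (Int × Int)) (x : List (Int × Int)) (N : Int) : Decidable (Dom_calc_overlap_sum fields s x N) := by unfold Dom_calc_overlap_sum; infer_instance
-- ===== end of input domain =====

-- B drops A's boolean mask grid and full N×N scan: one count grid, one destructive pass over s
-- (read each target cell, add it, zero it). Same return value wherever A
-- returns; B mutates only its own local grid, like A.

-- ===== PORT A =====
-- g[i][j] = v  (Python wrap semantics; total form, exact under Pre_'s in-range conditions)
def pvSet2 {α : Type} (g : List (List α)) (i j : Int) (v : α) : List (List α) :=
  PySem.List.pySetD g i (PySem.List.pySetD (PySem.List.pyGetD g i []) j v)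

-- g[i][j]  (Python wrap semantics; total form, exact under Pre_'s in-range conditions)
def pvGet2 {α : Type} (g : List (List α)) (i j : Int) (d : α) : α :=
  PySem.List.pyGetD (PySem.List.pyGetD g i []) j d

-- create_field(N, ele)
def pvCreateField {α : Type} (N : Int) (ele : α) : List (List α) :=
  (PySem.List.pyRange 0 N 1).map (fun _ => (PySem.List.pyRange 0 N 1).map (fun _ => ele))

def calc_overlap_sum (fields : List (List (Int × Int))) (s : List (Int × Int)) (x : List (Int × Int)) (N : Int) : Int :=
  let s_field := s.foldl (fun f p => pvSet2 f p.1 p.2 true) (pvCreateField N false)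
  let x_field := (PySem.List.enumerate x 0).foldl (fun f kp =>
      (PySem.List.pyGetD fields kp.1 []).foldl (fun f c =>
        pvSet2 f (kp.2.1 + c.1) (kp.2.2 + c.2) (pvGet2 f (kp.2.1 + c.1) (kp.2.2 + c.2) 0 + 1)) f)
    (pvCreateField N 0)
  (PySem.List.pyRange 0 N 1).foldl (fun cnt i =>
      (PySem.List.pyRange 0 N 1).foldl (fun cnt j =>
        if pvGet2 s_field i j false == true then cnt + pvGet2 x_field i j 0 else cnt) cnt) 0

-- ===== PORT B =====
def calc_overlap_sum_alt (fields : List (List (Int × Int))) (s : List (Int × Int)) (x : List (Int × Int)) (N : Int) : Int :=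
  let x_field0 := (PySem.List.pyRange 0 N 1).map (fun _ => (PySem.List.pyRange 0 N 1).map (fun _ => (0 : Int)))
  let x_field := (PySem.List.enumerate x 0).foldl (fun f kp =>
      (PySem.List.pyGetD fields kp.1 []).foldl (fun f c =>
        pvSet2 f (kp.2.1 + c.1) (kp.2.2 + c.2) (pvGet2 f (kp.2.1 + c.1) (kp.2.2 + c.2) 0 + 1)) f)
    x_field0
  (s.foldl (fun (acc : Int × List (List Int)) p =>
      (acc.1 + pvGet2 acc.2 p.1 p.2 0, pvSet2 acc.2 p.1 p.2 0)) (0, x_field)).1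

-- ===== PRECONDITION & SPEC =====
-- Pre_ excludes exactly the inputs where the Python A raises IndexError: a target in s or a shifted
-- placement cell outside index range [-N, N) of the N×N grid, or x longer than fields.
def Pre_calc_overlap_sum (fields : List (List (Int × Int))) (s : List (Int × Int)) (x : List (Int × Int)) (N : Int) : Prop :=
  x.length ≤ fields.length ∧
  (∀ p ∈ s, PySem.Raise.InRange N.toNat p.1 ∧ PySem.Raise.InRange N.toNat p.2) ∧
  (∀ q ∈ x.zip fields, ∀ c ∈ q.2,
    PySem.Raise.InRange N.toNat (q.1.1 + c.1) ∧ PySem.Raise.InRange N.toNat (q.1.2 + c.2))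
instance (fields : List (List (Int × Int))) (s : List (Int × Int)) (x : List (Int × Int)) (N : Int) : Decidable (Pre_calc_overlap_sum fields s x N) := by unfold Pre_calc_overlap_sum; infer_instance

def pvWitness_calc_overlap_sum : (List (List (Int × Int))) × (List (Int × Int)) × (List (Int × Int)) × Int :=
  ([[(0, 0), (0, 1)], [(1, 1)]], [(0, 1), (1, 1)], [(0, 0), (0, 0)], 2)

def Spec_calc_overlap_sum (fields : List (List (Int × Int))) (s : List (Int × Int)) (x : List (Int × Int)) (N : Int) (out : Int) : Prop := out = calc_overlap_sum_alt fields s x N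
instance (fields : List (List (Int × Int))) (s : List (Int × Int)) (x : List (Int × Int)) (N : Int) (out : Int) : Decidable (Spec_calc_overlap_sum fields s x N out) := by unfold Spec_calc_overlap_sum; infer_instance

-- ===== CLAIM (what is proved, stated in full; the proofs are below) =====
def Claim_equal_calc_overlap_sum : Prop := ∀ (fields : List (List (Int × Int))) (s : List (Int × Int)) (x : List (Int × Int)) (N : Int), Dom_calc_overlap_sum fields s x N → Pre_calc_overlap_sum fields s x N → Spec_calc_overlap_sum fields s x N (calc_overlap_sum fields s x N)

-- ===== LEMMAS AND PROOFS =====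

-- Python's wrapped index, as a Nat, for an in-range i
def pvNorm (n : Nat) (i : Int) : Nat := if 0 ≤ i then i.toNat else n - (-i).toNat

-- grid read/write at Nat coordinates
def pvFget {α : Type} (g : List (List α)) (a b : Nat) (d : α) : α := (g.getD a []).getD b d
def pvGset {α : Type} (g : List (List α)) (a b : Nat) (v : α) : List (List α) :=
  g.set a ((g.getD a []).set b v)

def pvDims {α : Type} (g : List (List α)) (M : Nat) : Prop := g.length = M ∧ ∀ r ∈ g, r.length = M

-- s's targets as wrapped Nat cells
def pvNs (M : Nat) (s : List (Int × Int)) : List (Nat × Nat) :=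
  s.map (fun p => (pvNorm M p.1, pvNorm M p.2))

-- B's destructive pass, on Nat cells
def pvBsum : List (Nat × Nat) → List (List Int) → Int
  | [], _ => 0
  | q :: t, g => pvFget g q.1 q.2 0 + pvBsum t (pvGset g q.1 q.2 0)

def pvSum2 (M : Nat) (f : Nat → Nat → Int) : Int :=
  ∑ i ∈ Finset.range M, ∑ j ∈ Finset.range M, f i j

theorem pvNorm_lt {n : Nat} {i : Int} (h : PySem.Raise.InRange n i) : pvNorm n i < n := by
  obtain ⟨h1, h2⟩ := h; unfold pvNorm; split <;> omega

theorem pvNorm_natCast (n : Nat) (a : Nat) : pvNorm n (a : Int) = a := by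
  simp [pvNorm]

theorem pvIdx_inrange {n : Nat} {i : Int} (h : PySem.Raise.InRange n i) :
    PySem.List.pyIdx? n i = some (pvNorm n i) := by
  obtain ⟨h1, h2⟩ := h
  simp only [PySem.List.pyIdx?, pvNorm]
  by_cases h0 : 0 ≤ i
  · rw [if_pos h0, if_pos (by omega), if_pos h0]
  · rw [if_neg h0, if_pos (by omega), if_neg h0]

theorem pvGetD_inrange {α : Type} {xs : List α} {i : Int} (d : α)
    (h : PySem.Raise.InRange xs.length i) :
    PySem.List.pyGetD xs i d = xs.getD (pvNorm xs.length i) d := by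
  simp only [PySem.List.pyGetD, PySem.List.pyGet?]
  rw [pvIdx_inrange h]
  simp [List.getD_eq_getElem?_getD]

theorem pvSetD_inrange {α : Type} {xs : List α} {i : Int} (v : α)
    (h : PySem.Raise.InRange xs.length i) :
    PySem.List.pySetD xs i v = xs.set (pvNorm xs.length i) v := by
  simp only [PySem.List.pySetD, PySem.List.pySet?]
  rw [pvIdx_inrange h]
  rfl

theorem pvSetD_out {α : Type} {xs : List α} {i : Int} (v : α)
    (h : ¬ PySem.Raise.InRange xs.length i) :
    PySem.List.pySetD xs i v = xs := by
  simp only [PySem.List.pySetD]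
  rw [(PySem.List.pySet?_eq_none_iff xs i v).mpr h]
  rfl

theorem pvGet2_eq {α : Type} {g : List (List α)} {M : Nat} {i j : Int} (d : α)
    (hg : pvDims g M) (hi : PySem.Raise.InRange M i) (hj : PySem.Raise.InRange M j) :
    pvGet2 g i j d = pvFget g (pvNorm M i) (pvNorm M j) d := by
  obtain ⟨hlen, hrow⟩ := hg
  subst hlen
  unfold pvGet2
  rw [pvGetD_inrange [] hi]
  have hk := pvNorm_lt hi
  have hr : (g.getD (pvNorm g.length i) []).length = g.length := by
    rw [List.getD_eq_getElem _ _ hk]; exact hrow _ (List.getElem_mem hk)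
  rw [pvGetD_inrange d (by rw [hr]; exact hj)]
  unfold pvFget
  rw [hr]

theorem pvSet2_eq {α : Type} {g : List (List α)} {M : Nat} {i j : Int} (v : α)
    (hg : pvDims g M) (hi : PySem.Raise.InRange M i) (hj : PySem.Raise.InRange M j) :
    pvSet2 g i j v = pvGset g (pvNorm M i) (pvNorm M j) v := by
  obtain ⟨hlen, hrow⟩ := hg
  subst hlen
  unfold pvSet2
  rw [pvGetD_inrange [] hi]
  have hk := pvNorm_lt hi
  have hr : (g.getD (pvNorm g.length i) []).length = g.length := by
    rw [List.getD_eq_getElem _ _ hk]; exact hrow _ (List.getElem_mem hk)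
  rw [pvSetD_inrange v (by rw [hr]; exact hj)]
  rw [hr]
  rw [pvSetD_inrange _ hi]
  rfl

theorem pvGetD_set_self {α : Type} (l : List α) (n : Nat) (r : α) (d : α) (h : n < l.length) :
    (l.set n r).getD n d = r := by
  rw [List.getD_eq_getElem?_getD, List.getElem?_set_self h]
  rfl

theorem pvGetD_set_ne {α : Type} (l : List α) {n m : Nat} (r : α) (d : α) (h : n ≠ m) :
    (l.set n r).getD m d = l.getD m d := by
  rw [List.getD_eq_getElem?_getD, List.getElem?_set_ne h, ← List.getD_eq_getElem?_getD]

theorem pvGetD_map {β γ : Type} (l : List β) (f : β → γ) (a : Nat) (d : γ) :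
    (l.map f).getD a d = (l[a]?.map f).getD d := by
  rw [List.getD_eq_getElem?_getD, List.getElem?_map]

theorem pvDims_set {α : Type} {g : List (List α)} {M : Nat} {a : Nat} {r : List α}
    (hg : pvDims g M) (hr : r.length = M) : pvDims (g.set a r) M := by
  obtain ⟨h1, h2⟩ := hg
  refine ⟨by simp [h1], ?_⟩
  intro q hq
  rcases List.mem_or_eq_of_mem_set hq with h | h
  · exact h2 q h
  · subst h; exact hr

theorem pvDims_pvGset {α : Type} {g : List (List α)} {M : Nat} {a b : Nat} (v : α)
    (hg : pvDims g M) : pvDims (pvGset g a b v) M := by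
  by_cases ha : a < g.length
  · apply pvDims_set hg
    have hrow : (g.getD a []).length = M := by
      rw [List.getD_eq_getElem _ _ ha]; exact hg.2 _ (List.getElem_mem ha)
    rw [List.length_set]; exact hrow
  · unfold pvGset
    rw [List.set_eq_of_length_le (by omega)]
    exact hg

theorem pvDims_pvSet2 {α : Type} {g : List (List α)} {M : Nat} {i j : Int} (v : α)
    (hg : pvDims g M) : pvDims (pvSet2 g i j v) M := by
  unfold pvSet2
  by_cases hin : PySem.Raise.InRange g.length i
  · rw [pvSetD_inrange _ hin]
    have hk := pvNorm_lt hin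
    apply pvDims_set hg
    rw [PySem.List.length_pySetD, pvGetD_inrange [] hin, List.getD_eq_getElem _ _ hk]
    exact hg.2 _ (List.getElem_mem hk)
  · rw [pvSetD_out _ hin]
    exact hg

theorem pvFget_pvGset_self {α : Type} {g : List (List α)} {M : Nat} {a b : Nat} (v d : α)
    (hg : pvDims g M) (ha : a < M) (hb : b < M) :
    pvFget (pvGset g a b v) a b d = v := by
  obtain ⟨h1, h2⟩ := hg
  have ha' : a < g.length := by omega
  have hrow : (g.getD a []).length = M := by
    rw [List.getD_eq_getElem _ _ ha']; exact h2 _ (List.getElem_mem ha')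
  unfold pvFget pvGset
  rw [pvGetD_set_self _ _ _ _ ha']
  rw [pvGetD_set_self _ _ _ _ (by omega)]

theorem pvFget_pvGset_ne {α : Type} {g : List (List α)} {a b a' b' : Nat} (v d : α)
    (h : ¬ (a' = a ∧ b' = b)) :
    pvFget (pvGset g a b v) a' b' d = pvFget g a' b' d := by
  unfold pvFget pvGset
  by_cases hA : a' = a
  · subst hA
    have hb' : b ≠ b' := fun hh => h ⟨rfl, hh.symm⟩
    by_cases ha : a' < g.length
    · rw [pvGetD_set_self _ _ _ _ ha, pvGetD_set_ne _ _ _ hb']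
    · rw [List.set_eq_of_length_le (by omega)]
  · rw [pvGetD_set_ne _ _ _ (fun hh => hA hh.symm)]

theorem pvGetD_map_const {β γ : Type} (l : List β) (e : γ) (b : Nat) :
    (l.map (fun _ => e)).getD b e = e := by
  rw [pvGetD_map]
  cases l[b]? <;> simp

theorem pvDims_createField {α : Type} (N : Int) (e : α) :
    pvDims (pvCreateField N e) N.toNat := by
  constructor
  · rw [pvCreateField, List.length_map, PySem.List.length_pyRange_one]; simp
  · intro r hr
    rcases List.mem_map.mp hr with ⟨a, -, rfl⟩
    rw [List.length_map, PySem.List.length_pyRange_one]; simp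

theorem pvFget_createField {α : Type} (N : Int) (e : α) (a b : Nat) :
    pvFget (pvCreateField N e) a b e = e := by
  unfold pvFget pvCreateField
  rw [pvGetD_map]
  cases (PySem.List.pyRange 0 N 1)[a]? with
  | none => simp
  | some r => exact pvGetD_map_const (PySem.List.pyRange 0 N 1) e b

theorem pvFoldl_preserve {β γ : Type} (P : γ → Prop) (f : γ → β → γ)
    (h : ∀ g b, P g → P (f g b)) : ∀ (l : List β) (g : γ), P g → P (l.foldl f g) := by
  intro l
  induction l with
  | nil => intro g hg; simpa using hg
  | cons b t ih => intro g hg; simpa using ih _ (h g b hg)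

-- A's mask grid reads as membership in the wrapped target list
theorem pvMask_fget {M : Nat} :
    ∀ (s : List (Int × Int)) (g0 : List (List Bool)), pvDims g0 M →
      (∀ p ∈ s, PySem.Raise.InRange M p.1 ∧ PySem.Raise.InRange M p.2) →
      ∀ a b : Nat,
        pvFget (s.foldl (fun f p => pvSet2 f p.1 p.2 true) g0) a b false
          = (pvFget g0 a b false || decide ((a, b) ∈ pvNs M s)) := by
  intro s
  induction s with
  | nil => intro g0 hg hs a b; simp [pvNs]
  | cons p t ih =>
    intro g0 hg hs a b
    have hp := hs p (by simp)
    simp only [List.foldl_cons]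
    rw [pvSet2_eq true hg hp.1 hp.2]
    rw [ih _ (pvDims_pvGset _ hg) (fun q hq => hs q (by simp [hq]))]
    by_cases hab : a = pvNorm M p.1 ∧ b = pvNorm M p.2
    · obtain ⟨rfl, rfl⟩ := hab
      rw [pvFget_pvGset_self true false hg (pvNorm_lt hp.1) (pvNorm_lt hp.2)]
      simp [pvNs]
    · rw [pvFget_pvGset_ne true false hab]
      have hne : (a, b) ≠ (pvNorm M p.1, pvNorm M p.2) := by
        intro hh; exact hab ⟨congrArg Prod.fst hh, congrArg Prod.snd hh⟩
      simp only [pvNs, List.map_cons]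
      congr 1
      exact decide_eq_decide.mpr (by simp [List.mem_cons, hne])

-- B's destructive pass is pvBsum
theorem pvBfold {M : Nat} :
    ∀ (s : List (Int × Int)) (g : List (List Int)) (c0 : Int), pvDims g M →
      (∀ p ∈ s, PySem.Raise.InRange M p.1 ∧ PySem.Raise.InRange M p.2) →
      (s.foldl (fun (acc : Int × List (List Int)) p =>
          (acc.1 + pvGet2 acc.2 p.1 p.2 0, pvSet2 acc.2 p.1 p.2 0)) (c0, g)).1
        = c0 + pvBsum (pvNs M s) g := by
  intro s
  induction s with
  | nil => intro g c0 hg hs; simp [pvNs, pvBsum]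
  | cons p t ih =>
    intro g c0 hg hs
    have hp := hs p (by simp)
    simp only [List.foldl_cons]
    rw [pvGet2_eq 0 hg hp.1 hp.2, pvSet2_eq 0 hg hp.1 hp.2]
    rw [ih _ _ (pvDims_pvGset _ hg) (fun q hq => hs q (by simp [hq]))]
    simp only [pvNs, List.map_cons, pvBsum]
    ring

theorem pvSum2_delta {M : Nat} {a0 b0 : Nat} (c : Int) (ha : a0 < M) (hb : b0 < M) :
    pvSum2 M (fun a b => if a = a0 ∧ b = b0 then c else 0) = c := by
  unfold pvSum2
  have hinner : ∀ i : Nat, (∑ j ∈ Finset.range M, if i = a0 ∧ j = b0 then c else 0)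
      = if i = a0 then c else 0 := by
    intro i
    by_cases hi : i = a0
    · subst hi; simp [Finset.sum_ite_eq', hb]
    · simp [hi]
  rw [Finset.sum_congr rfl (fun i _ => hinner i)]
  simp [Finset.sum_ite_eq', ha]

theorem pvSum2_congr {M : Nat} {f h : Nat → Nat → Int}
    (he : ∀ a b, a < M → b < M → f a b = h a b) : pvSum2 M f = pvSum2 M h :=
  Finset.sum_congr rfl fun i hi => Finset.sum_congr rfl fun j hj =>
    he i j (Finset.mem_range.mp hi) (Finset.mem_range.mp hj)

theorem pvSum2_add {M : Nat} (f h : Nat → Nat → Int) :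
    pvSum2 M (fun a b => f a b + h a b) = pvSum2 M f + pvSum2 M h := by
  unfold pvSum2
  simp [Finset.sum_add_distrib]

-- the masked full scan equals the destructive pass
theorem pvSum2_bsum {M : Nat} :
    ∀ (qs : List (Nat × Nat)) (g : List (List Int)), pvDims g M →
      (∀ q ∈ qs, q.1 < M ∧ q.2 < M) →
      pvSum2 M (fun a b => if (a, b) ∈ qs then pvFget g a b 0 else 0) = pvBsum qs g := by
  intro qs
  induction qs with
  | nil => intro g hg hq; simp [pvBsum, pvSum2]
  | cons q t ih =>
    intro g hg hq
    have hq1 := hq q (by simp)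
    have hpt : ∀ a b : Nat, a < M → b < M →
        (if (a, b) ∈ q :: t then pvFget g a b 0 else 0)
          = (if (a, b) ∈ t then pvFget (pvGset g q.1 q.2 0) a b 0 else 0)
            + (if a = q.1 ∧ b = q.2 then pvFget g q.1 q.2 0 else 0) := by
      intro a b _ _
      by_cases hab : a = q.1 ∧ b = q.2
      · obtain ⟨rfl, rfl⟩ := hab
        have hmem : (q.1, q.2) ∈ q :: t := by
          rw [Prod.mk.eta]; exact List.mem_cons_self
        rw [if_pos hmem, if_pos (show q.1 = q.1 ∧ q.2 = q.2 from ⟨rfl, rfl⟩)]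
        by_cases hm : (q.1, q.2) ∈ t
        · rw [if_pos hm, pvFget_pvGset_self 0 0 hg hq1.1 hq1.2]; ring
        · rw [if_neg hm]; ring
      · have hne : (a, b) ≠ q := by
          intro hh; exact hab ⟨by rw [← hh], by rw [← hh]⟩
        rw [pvFget_pvGset_ne 0 0 hab, if_neg hab]
        simp only [List.mem_cons, hne, false_or, add_zero]
    rw [pvSum2_congr hpt, pvSum2_add, pvSum2_delta _ hq1.1 hq1.2]
    rw [ih _ (pvDims_pvGset _ hg) (fun r hr => hq r (by simp [hr]))]
    simp only [pvBsum]
    ring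

theorem pvFoldl_if_add {γ : Type} (l : List γ) (p : γ → Bool) (v : γ → Int) (c0 : Int) :
    l.foldl (fun c a => if p a then c + v a else c) c0
      = c0 + (l.map (fun a => if p a then v a else 0)).sum := by
  have hf : (fun (c : Int) a => if p a then c + v a else c)
      = fun c a => c + (if p a then v a else 0) := by
    funext c a; by_cases h : p a <;> simp [h]
  rw [hf, PySem.List.foldl_add]

theorem pvSum_range_list (M : Nat) (f : Nat → Int) :
    ((List.range M).map f).sum = ∑ i ∈ Finset.range M, f i := by
  induction M with
  | zero => simp
  | succ n ih => rw [List.sum_range_succ, Finset.sum_range_succ, ih]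

-- A's full-grid masked scan, as a double sum
theorem pvScanA (sf : List (List Bool)) (xf : List (List Int)) (N : Int) :
    (PySem.List.pyRange 0 N 1).foldl (fun cnt i =>
        (PySem.List.pyRange 0 N 1).foldl (fun cnt j =>
          if pvGet2 sf i j false == true then cnt + pvGet2 xf i j 0 else cnt) cnt) 0
      = pvSum2 N.toNat (fun a b =>
          if pvGet2 sf (a : Int) (b : Int) false == true then pvGet2 xf (a : Int) (b : Int) 0 else 0) := by
  simp only [PySem.List.pyRange_one, List.foldl_map, zero_add, sub_zero]
  have hin : ∀ (c : Int) (k : Nat),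
      List.foldl (fun cnt (b : Nat) =>
        if pvGet2 sf (k : Int) (b : Int) false == true then cnt + pvGet2 xf (k : Int) (b : Int) 0 else cnt)
        c (List.range N.toNat)
      = c + ∑ b ∈ Finset.range N.toNat,
          (if pvGet2 sf (k : Int) (b : Int) false == true then pvGet2 xf (k : Int) (b : Int) 0 else 0) := by
    intro c k
    rw [pvFoldl_if_add, pvSum_range_list]
  simp only [hin]
  rw [PySem.List.foldl_add, pvSum_range_list, zero_add]
  rfl

-- ===== VERDICT (by name: the statement is the Claim_ definition above) =====
theorem calc_overlap_sum_spec : Claim_equal_calc_overlap_sum := by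
  intro fields s x N _ hpre
  obtain ⟨-, hs, -⟩ := hpre
  unfold Spec_calc_overlap_sum
  simp only [calc_overlap_sum, calc_overlap_sum_alt]
  rw [show ((PySem.List.pyRange 0 N 1).map (fun _ =>
      (PySem.List.pyRange 0 N 1).map (fun _ => (0 : Int)))) = pvCreateField N 0 from rfl]
  set sf := s.foldl (fun f p => pvSet2 f p.1 p.2 true) (pvCreateField N false) with hsf
  set xf := (PySem.List.enumerate x 0).foldl (fun (f : List (List Int)) kp =>
      (PySem.List.pyGetD fields kp.1 []).foldl (fun f c =>
        pvSet2 f (kp.2.1 + c.1) (kp.2.2 + c.2) (pvGet2 f (kp.2.1 + c.1) (kp.2.2 + c.2) 0 + 1)) f)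
    (pvCreateField N (0 : Int)) with hxf
  have hdimsS : pvDims sf N.toNat := by
    rw [hsf]
    exact pvFoldl_preserve (fun g => pvDims g N.toNat) _
      (fun g p hg => pvDims_pvSet2 _ hg) _ _ (pvDims_createField N false)
  have hdimsX : pvDims xf N.toNat := by
    rw [hxf]
    exact pvFoldl_preserve (fun g => pvDims g N.toNat) _
      (fun g kp hg => pvFoldl_preserve (fun g => pvDims g N.toNat) _
        (fun g c hg => pvDims_pvSet2 _ hg) _ _ hg) _ _ (pvDims_createField N 0)
  rw [pvBfold s xf 0 hdimsX hs]
  rw [pvScanA sf xf N]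
  have hpt : ∀ a b : Nat, a < N.toNat → b < N.toNat →
      (if pvGet2 sf (a : Int) (b : Int) false == true then pvGet2 xf (a : Int) (b : Int) 0 else 0)
        = (if (a, b) ∈ pvNs N.toNat s then pvFget xf a b 0 else 0) := by
    intro a b ha hb
    have hia : PySem.Raise.InRange N.toNat (a : Int) := by constructor <;> omega
    have hib : PySem.Raise.InRange N.toNat (b : Int) := by constructor <;> omega
    rw [pvGet2_eq false hdimsS hia hib, pvGet2_eq 0 hdimsX hia hib,
      pvNorm_natCast, pvNorm_natCast]
    rw [hsf, pvMask_fget s (pvCreateField N false) (pvDims_createField N false) hs a b]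
    rw [pvFget_createField]
    by_cases hm : (a, b) ∈ pvNs N.toNat s <;> simp [hm]
  rw [pvSum2_congr hpt]
  have hcomp : ∀ q ∈ pvNs N.toNat s, q.1 < N.toNat ∧ q.2 < N.toNat := by
    intro q hq
    rcases List.mem_map.mp hq with ⟨p, hp, rfl⟩
    exact ⟨pvNorm_lt (hs p hp).1, pvNorm_lt (hs p hp).2⟩
  rw [pvSum2_bsum (pvNs N.toNat s) xf hdimsX hcomp]
  rw [zero_add]
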